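-- pv_equiv track=rewrite | github.com/loggi/redis-schematics | redis_schematics/utils.py | group_filters_by_suffix
-- ===== SOURCE A (Python) =====
-- FILTER_OPS = {
--     "__gt": lambda s, r: s > r,
--     "__lt": lambda s, r: s < r,
--     "__gte": lambda s, r: s >= r,
--     "__lte": lambda s, r: s <= r,
--     "__eq": lambda s, r: s == r,
--     "__not": lambda s, r: s != r,
--     "__in": lambda s, r: s in r,
--     "__exclude": lambda s, r: s not in r,
-- }
--
-- def group_filters_by_suffix(filters):
--
--     used = {}
--
--     def get_suffix(suffix):
--         suffixed = {k: v for k, v in filters.items() if k.endswith(suffix)}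
--         cleaned = {k.replace(suffix, ""): v for k, v in suffixed.items()}
--         used.update(suffixed)
--         return cleaned
--
--     filter_group = {k: get_suffix(k) for k in FILTER_OPS}
--     filter_group["__eq"].update(**{k: v for k, v in filters.items() if k not in used})
--     return filter_group
-- ===== SOURCE B (Python) =====
-- OP_SUFFIXES = ["__gt", "__lt", "__gte", "__lte", "__eq", "__not", "__in", "__exclude"]
--
--
-- def group_filters_by_suffix(filters):
--     filter_group = {op: {} for op in OP_SUFFIXES}
--     unmatched = {}
--     for k, v in filters.items():
--         for op in OP_SUFFIXES:
--             if k.endswith(op):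
--                 filter_group[op][k.replace(op, "")] = v
--                 break
--         else:
--             unmatched[k] = v
--     filter_group["__eq"].update(unmatched)
--     return filter_group
-- ===== Notes on version B (the rewrite author's own statement) =====
-- stated objective: simpler
-- what changed: Replaces A's eight full passes over filters (one dict comprehension per operator suffix, plus a 'used' dict and a final not-in-used scan) by one pass over filters that classifies each key by its unique matching suffix into pre-created empty groups, stashing unmatched keys and merging them into __eq at the end.
import Mathlib
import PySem

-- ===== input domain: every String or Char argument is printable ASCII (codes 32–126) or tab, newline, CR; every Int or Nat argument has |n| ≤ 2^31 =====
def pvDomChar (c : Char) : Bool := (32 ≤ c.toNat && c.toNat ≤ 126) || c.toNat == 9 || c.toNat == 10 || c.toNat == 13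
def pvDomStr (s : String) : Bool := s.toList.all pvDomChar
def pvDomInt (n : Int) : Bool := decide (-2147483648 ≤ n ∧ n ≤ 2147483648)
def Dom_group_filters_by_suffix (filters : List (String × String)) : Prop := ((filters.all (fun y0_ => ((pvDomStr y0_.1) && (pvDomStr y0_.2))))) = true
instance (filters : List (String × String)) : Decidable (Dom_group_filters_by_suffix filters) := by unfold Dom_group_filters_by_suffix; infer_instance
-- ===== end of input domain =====

-- B replaces A's eight per-suffix passes over filters by one classifying pass; objective: simpler.


-- FILTER_OPS keys, in the module's order (both Pythons iterate them in this order)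
def pvOps : List String := ["__gt", "__lt", "__gte", "__lte", "__eq", "__not", "__in", "__exclude"]

-- ===== PORT A =====
-- get_suffix(suffix): builds suffixed (dict comp with endswith test), cleaned (dict comp with replaced keys),
-- and updates the closed-over 'used'; returns (cleaned, new used).
def pvGetSuffix (filters : List (String × String)) (used : PySem.Dict String String) (suffix : String) :
    PySem.Dict String String × PySem.Dict String String :=
  let suffixed : PySem.Dict String String :=
    filters.foldl (fun d kv => if PySem.Str.endswith kv.1 suffix then d.insert kv.1 kv.2 else d) PySem.Dict.empty
  let cleaned : PySem.Dict String String :=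
    suffixed.items.foldl (fun d kv => d.insert (PySem.Str.replace kv.1 suffix "") kv.2) PySem.Dict.empty
  (cleaned, used.update suffixed.items)

def group_filters_by_suffix (filters : List (String × String)) : List (String × List (String × String)) :=
  -- filter_group = {k: get_suffix(k) for k in FILTER_OPS}, threading 'used'
  let st := pvOps.foldl
    (fun (st : PySem.Dict String (PySem.Dict String String) × PySem.Dict String String) k =>
      (st.1.insert k (pvGetSuffix filters st.2 k).1, (pvGetSuffix filters st.2 k).2))
    (PySem.Dict.empty, PySem.Dict.empty)
  -- filter_group["__eq"].update(**{k: v for k, v in filters.items() if k not in used})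
  let unmatched : PySem.Dict String String :=
    filters.foldl (fun d kv => if st.2.contains kv.1 then d else d.insert kv.1 kv.2) PySem.Dict.empty
  let fg := st.1.modify "__eq" PySem.Dict.empty (fun d => d.update unmatched.items)
  fg.items.map (fun p => (p.1, p.2.items))

-- ===== PORT B =====
-- OP_SUFFIXES (Source B's own copy of the suffix list)
def pvOpsAlt : List String := ["__gt", "__lt", "__gte", "__lte", "__eq", "__not", "__in", "__exclude"]

def group_filters_by_suffix_alt (filters : List (String × String)) : List (String × List (String × String)) :=
  -- filter_group = {op: {} for op in OP_SUFFIXES}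
  let init : PySem.Dict String (PySem.Dict String String) :=
    pvOpsAlt.foldl (fun d op => d.insert op PySem.Dict.empty) PySem.Dict.empty
  -- single pass: classify each key by the (unique) suffix it ends with, else stash in unmatched
  let st := filters.foldl
    (fun (st : PySem.Dict String (PySem.Dict String String) × PySem.Dict String String) kv =>
      match pvOpsAlt.find? (fun op => PySem.Str.endswith kv.1 op) with
      | some op => (st.1.modify op PySem.Dict.empty (fun d => d.insert (PySem.Str.replace kv.1 op "") kv.2), st.2)
      | none => (st.1, st.2.insert kv.1 kv.2))
    (init, PySem.Dict.empty)
  -- filter_group["__eq"].update(unmatched)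
  let fg := st.1.modify "__eq" PySem.Dict.empty (fun d => d.update st.2.items)
  fg.items.map (fun p => (p.1, p.2.items))

-- ===== PRECONDITION & SPEC =====
-- Pre_ excludes association lists with duplicate keys: they do not represent a Python dict
-- (a duplicate key collapses in the dict before A ever runs), so the list form is a representation artefact.
def Pre_group_filters_by_suffix (filters : List (String × String)) : Prop :=
  (filters.map Prod.fst).Nodup
instance (filters : List (String × String)) : Decidable (Pre_group_filters_by_suffix filters) := by
  unfold Pre_group_filters_by_suffix; infer_instance

def pvWitness_group_filters_by_suffix : (List (String × String)) :=
  [("a__gt", "1"), ("b__in", "x"), ("c", "7"), ("d__eq", "z")]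

def Spec_group_filters_by_suffix (filters : List (String × String)) (out : List (String × List (String × String))) : Prop := out = group_filters_by_suffix_alt filters
instance (filters : List (String × String)) (out : List (String × List (String × String))) : Decidable (Spec_group_filters_by_suffix filters out) := by unfold Spec_group_filters_by_suffix; infer_instance

-- ===== CLAIM (what is proved, stated in full; the proofs are below) =====
def Claim_equal_group_filters_by_suffix : Prop := ∀ (filters : List (String × String)), Dom_group_filters_by_suffix filters → Pre_group_filters_by_suffix filters → Spec_group_filters_by_suffix filters (group_filters_by_suffix filters)

-- ===== LEMMAS AND PROOFS =====

-- filters entries whose key ends with op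
def pvS (filters : List (String × String)) (op : String) : List (String × String) :=
  filters.filter (fun kv => PySem.Str.endswith kv.1 op)

-- the group a suffix collects, as both programs build it (insert order = filters order)
def pvGroup (filters : List (String × String)) (op : String) : PySem.Dict String String :=
  (pvS filters op).foldl (fun d kv => d.insert (PySem.Str.replace kv.1 op "") kv.2) PySem.Dict.empty

-- the unmatched entries, as a dict
def pvUn (filters : List (String × String)) : PySem.Dict String String :=
  (filters.filter (fun kv => (pvOps.find? (fun o => PySem.Str.endswith kv.1 o)).isNone)).foldl
    (fun d kv => d.insert kv.1 kv.2) PySem.Dict.empty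

-- the common final value of both programs
def pvF (filters : List (String × String)) (op : String) : PySem.Dict String String :=
  if op = "__eq" then (pvGroup filters "__eq").update (pvUn filters).items else pvGroup filters op

-- no FILTER_OPS suffix is a suffix of another, so a key ends with at most one of them
lemma pv_unique_suffix (k op op' : String) (h : op ∈ pvOps) (h' : op' ∈ pvOps)
    (e : PySem.Str.endswith k op = true) (e' : PySem.Str.endswith k op' = true) : op = op' := by
  have s1 : op.toList <:+ k.toList := by
    simp only [PySem.Str.endswith_eq] at e; exact (PySem.Chars.endswith_iff _ _).1 e
  have s2 : op'.toList <:+ k.toList := by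
    simp only [PySem.Str.endswith_eq] at e'; exact (PySem.Chars.endswith_iff _ _).1 e'
  have hd := List.suffix_or_suffix_of_suffix s1 s2
  fin_cases h <;> fin_cases h' <;> first | rfl | (exact absurd hd (by decide))

lemma pv_find_eq_some (k op : String) (h : op ∈ pvOps) (e : PySem.Str.endswith k op = true) :
    pvOps.find? (fun o => PySem.Str.endswith k o) = some op := by
  have h1 : (pvOps.find? (fun o => PySem.Str.endswith k o)).isSome := by
    rw [List.find?_isSome]; exact ⟨op, h, e⟩
  obtain ⟨x, hx⟩ := Option.isSome_iff_exists.mp h1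
  have := pv_unique_suffix k x op (List.mem_of_find?_eq_some hx) h (List.find?_some hx) e
  rw [hx, this]

lemma pv_endswith_iff_find (k op : String) (h : op ∈ pvOps) :
    PySem.Str.endswith k op = (pvOps.find? (fun o => PySem.Str.endswith k o) == some op) := by
  cases e : PySem.Str.endswith k op with
  | true => rw [pv_find_eq_some k op h e]; simp
  | false =>
    rcases e' : pvOps.find? (fun o => PySem.Str.endswith k o) with _ | x
    · rfl
    · have hpx := List.find?_some e'
      by_cases hxo : x = op
      · rw [hxo] at hpx; rw [hpx] at e; exact absurd e (by simp)
      · simp [hxo]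

-- membership in the keys of a fold of dict.updates
lemma pv_mem_keys_update_fold (ops : List String) (u : PySem.Dict String String)
    (f : String → List (String × String)) (k : String) :
    (k ∈ (ops.foldl (fun u op => u.update (f op)) u).keys) ↔
      k ∈ u.keys ∨ ∃ op ∈ ops, k ∈ (f op).map Prod.fst := by
  induction ops generalizing u with
  | nil => simp
  | cons o t ih =>
    simp only [List.foldl_cons, ih]
    have hu : (k ∈ (u.update (f o)).keys) ↔ k ∈ u.keys ∨ k ∈ (f o).map Prod.fst := by
      show (k ∈ ((f o).foldl (fun d p => d.insert p.1 p.2) u).keys) ↔ _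
      rw [PySem.Dict.keys_foldl_insert_key (f o) Prod.fst (fun _ p => p.2) u]
      exact PySem.Set.mem_update _ _ _
    rw [hu]
    constructor
    · rintro (( h | h) | ⟨op, hop, hk⟩)
      · exact Or.inl h
      · exact Or.inr ⟨o, by simp, h⟩
      · exact Or.inr ⟨op, by simp [hop], hk⟩
    · rintro (h | ⟨op, hop, hk⟩)
      · exact Or.inl (Or.inl h)
      · rcases List.mem_cons.mp hop with rfl | hop
        · exact Or.inl (Or.inr hk)
        · exact Or.inr ⟨op, hop, hk⟩

-- the 'suffixed' dict-comprehension lists exactly the matching entries (keys unique)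
lemma pv_suffixed_items (filters : List (String × String)) (op : String)
    (hpre : (filters.map Prod.fst).Nodup) :
    (filters.foldl (fun d kv => if PySem.Str.endswith kv.1 op then d.insert kv.1 kv.2 else d)
      (PySem.Dict.empty : PySem.Dict String String)).items = pvS filters op := by
  rw [PySem.List.foldl_if_eq_foldl_filter]
  have h1 : ∀ a ∈ pvS filters op, (PySem.Dict.empty : PySem.Dict String String).contains a.1 = false := by
    intro a _; exact PySem.Dict.contains_empty _
  have h2 : ((pvS filters op).map Prod.fst).Nodup :=
    hpre.sublist (List.filter_sublist.map Prod.fst)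
  have := PySem.Dict.items_foldl_insert_fresh (pvS filters op) Prod.fst Prod.snd PySem.Dict.empty h1 h2
  simpa using this

-- A's threaded (filter_group, used) fold splits into two independent folds
set_option maxHeartbeats 1000000 in
lemma pvA_fold (filters : List (String × String)) :
    pvOps.foldl
      (fun (st : PySem.Dict String (PySem.Dict String String) × PySem.Dict String String) k =>
        (st.1.insert k (pvGetSuffix filters st.2 k).1, (pvGetSuffix filters st.2 k).2))
      (PySem.Dict.empty, PySem.Dict.empty) =
    (pvOps.foldl (fun d k => d.insert k (pvGetSuffix filters PySem.Dict.empty k).1) PySem.Dict.empty,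
     pvOps.foldl (fun u k => u.update
        (filters.foldl (fun d kv => if PySem.Str.endswith kv.1 k then d.insert kv.1 kv.2 else d)
          (PySem.Dict.empty : PySem.Dict String String)).items) PySem.Dict.empty) := by
  suffices h : ∀ (ops : List String) (a : PySem.Dict String (PySem.Dict String String))
      (b : PySem.Dict String String),
      ops.foldl
        (fun (st : PySem.Dict String (PySem.Dict String String) × PySem.Dict String String) k =>
          (st.1.insert k (pvGetSuffix filters st.2 k).1, (pvGetSuffix filters st.2 k).2)) (a, b) =
      (ops.foldl (fun d k => d.insert k (pvGetSuffix filters PySem.Dict.empty k).1) a,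
       ops.foldl (fun u k => u.update
          (filters.foldl (fun d kv => if PySem.Str.endswith kv.1 k then d.insert kv.1 kv.2 else d)
            (PySem.Dict.empty : PySem.Dict String String)).items) b) by
    exact h pvOps PySem.Dict.empty PySem.Dict.empty
  intro ops
  induction ops with
  | nil => intro a b; rfl
  | cons o t ih =>
    intro a b
    simp only [List.foldl_cons]
    exact ih (a.insert o (pvGetSuffix filters PySem.Dict.empty o).1)
      (b.update (filters.foldl (fun d kv => if PySem.Str.endswith kv.1 o then d.insert kv.1 kv.2 else d)
        (PySem.Dict.empty : PySem.Dict String String)).items)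

-- the cleaned group A builds for op equals pvGroup (under unique keys)
lemma pv_cleaned_eq (filters : List (String × String)) (op : String)
    (hpre : (filters.map Prod.fst).Nodup) :
    (pvGetSuffix filters PySem.Dict.empty op).1 = pvGroup filters op := by
  show ((filters.foldl (fun d kv => if PySem.Str.endswith kv.1 op then d.insert kv.1 kv.2 else d)
      (PySem.Dict.empty : PySem.Dict String String)).items.foldl
      (fun d kv => d.insert (PySem.Str.replace kv.1 op "") kv.2) PySem.Dict.empty) = _
  rw [pv_suffixed_items filters op hpre]; rfl

-- A's filter_group before the final update: keys and per-op values
lemma pvA_fg_items (filters : List (String × String)) (hpre : (filters.map Prod.fst).Nodup) :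
    (pvOps.foldl (fun d k => d.insert k (pvGetSuffix filters PySem.Dict.empty k).1)
      (PySem.Dict.empty : PySem.Dict String (PySem.Dict String String))).items =
      pvOps.map (fun op => (op, pvGroup filters op)) := by
  have h1 : ∀ a ∈ pvOps, (PySem.Dict.empty : PySem.Dict String (PySem.Dict String String)).contains (id a) = false := by
    intro a _; exact PySem.Dict.contains_empty _
  have := PySem.Dict.items_foldl_insert_fresh pvOps id (fun k => (pvGetSuffix filters PySem.Dict.empty k).1)
    PySem.Dict.empty h1 (by simp; decide)
  simp only [id] at this
  rw [this]
  have hemp : (PySem.Dict.empty : PySem.Dict String (PySem.Dict String String)).items = [] := rfl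
  rw [hemp, List.nil_append]
  exact List.map_congr_left (fun op hop => by rw [pv_cleaned_eq filters op hpre])

-- A's 'used' dict contains exactly the keys that end with some suffix
lemma pvA_used_contains (filters : List (String × String)) (hpre : (filters.map Prod.fst).Nodup)
    (kv : String × String) (hkv : kv ∈ filters) :
    (pvOps.foldl (fun u k => u.update
        (filters.foldl (fun d kv => if PySem.Str.endswith kv.1 k then d.insert kv.1 kv.2 else d)
          (PySem.Dict.empty : PySem.Dict String String)).items) PySem.Dict.empty).contains kv.1 =
      !(pvOps.find? (fun o => PySem.Str.endswith kv.1 o)).isNone := by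
  rw [PySem.Dict.contains_eq_decide_mem_keys]
  have hmem := pv_mem_keys_update_fold pvOps PySem.Dict.empty
    (fun k => (filters.foldl (fun d kv => if PySem.Str.endswith kv.1 k then d.insert kv.1 kv.2 else d)
          (PySem.Dict.empty : PySem.Dict String String)).items) kv.1
  rcases hfind : pvOps.find? (fun o => PySem.Str.endswith kv.1 o) with _ | op
  · simp only [Option.isNone_none, Bool.not_true]
    rw [decide_eq_false_iff_not, hmem]
    rintro (h | ⟨op, hop, hk⟩)
    · simp at h
    · rw [pv_suffixed_items filters op hpre] at hk
      obtain ⟨kv', hkv', heq⟩ := List.mem_map.mp hk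
      have h5 := List.of_mem_filter hkv'
      rw [heq] at h5
      exact absurd h5 (List.find?_eq_none.mp hfind op hop)
  · simp only [Option.isNone_some, Bool.not_false]
    rw [decide_eq_true_iff, hmem]
    refine Or.inr ⟨op, List.mem_of_find?_eq_some hfind, ?_⟩
    rw [pv_suffixed_items filters op hpre]
    exact List.mem_map.mpr ⟨kv, List.mem_filter.mpr ⟨hkv, List.find?_some hfind⟩, rfl⟩

-- A's unmatched dict is pvUn
lemma pvA_unmatched (filters : List (String × String)) (hpre : (filters.map Prod.fst).Nodup)
    (used : PySem.Dict String String)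
    (hused : ∀ kv ∈ filters, used.contains kv.1 = !(pvOps.find? (fun o => PySem.Str.endswith kv.1 o)).isNone) :
    filters.foldl (fun d kv => if used.contains kv.1 then d else d.insert kv.1 kv.2)
      (PySem.Dict.empty : PySem.Dict String String) = pvUn filters := by
  rw [PySem.List.foldl_congr_mem filters _
    (fun d kv => if (pvOps.find? (fun o => PySem.Str.endswith kv.1 o)).isNone then d.insert kv.1 kv.2 else d) _
    (by
      intro acc kv hkv
      beta_reduce
      rw [hused kv hkv]
      cases hb : (pvOps.find? (fun o => PySem.Str.endswith kv.1 o)).isNone <;> rfl)]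
  rw [PySem.List.foldl_if_eq_foldl_filter]
  rfl

-- the B loop invariant
lemma pvB_loop (filters l : List (String × String)) (fg : PySem.Dict String (PySem.Dict String String))
    (un : PySem.Dict String String) (hk : ∀ op ∈ pvOps, fg.contains op = true) :
    (l.foldl
      (fun (st : PySem.Dict String (PySem.Dict String String) × PySem.Dict String String) kv =>
        match pvOps.find? (fun op => PySem.Str.endswith kv.1 op) with
        | some op => (st.1.modify op PySem.Dict.empty (fun d => d.insert (PySem.Str.replace kv.1 op "") kv.2), st.2)
        | none => (st.1, st.2.insert kv.1 kv.2)) (fg, un)).1.keys = fg.keys ∧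
    (∀ op ∈ pvOps,
      (l.foldl
        (fun (st : PySem.Dict String (PySem.Dict String String) × PySem.Dict String String) kv =>
          match pvOps.find? (fun op => PySem.Str.endswith kv.1 op) with
          | some op => (st.1.modify op PySem.Dict.empty (fun d => d.insert (PySem.Str.replace kv.1 op "") kv.2), st.2)
          | none => (st.1, st.2.insert kv.1 kv.2)) (fg, un)).1.getD op PySem.Dict.empty =
      (l.filter (fun kv => pvOps.find? (fun o => PySem.Str.endswith kv.1 o) == some op)).foldl
        (fun d kv => d.insert (PySem.Str.replace kv.1 op "") kv.2) (fg.getD op PySem.Dict.empty)) ∧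
    (l.foldl
      (fun (st : PySem.Dict String (PySem.Dict String String) × PySem.Dict String String) kv =>
        match pvOps.find? (fun op => PySem.Str.endswith kv.1 op) with
        | some op => (st.1.modify op PySem.Dict.empty (fun d => d.insert (PySem.Str.replace kv.1 op "") kv.2), st.2)
        | none => (st.1, st.2.insert kv.1 kv.2)) (fg, un)).2 =
    (l.filter (fun kv => (pvOps.find? (fun o => PySem.Str.endswith kv.1 o)).isNone)).foldl
        (fun d kv => d.insert kv.1 kv.2) un := by
  induction l generalizing fg un with
  | nil => exact ⟨rfl, fun _ _ => rfl, rfl⟩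
  | cons kv t ih =>
    simp only [List.foldl_cons, List.filter_cons]
    rcases hfind : pvOps.find? (fun o => PySem.Str.endswith kv.1 o) with _ | op0
    · simp only [hfind, Option.isNone_none]
      obtain ⟨ihk, ihg, ihu⟩ := ih fg (un.insert kv.1 kv.2) hk
      refine ⟨ihk, fun op hop => ?_, by simpa using ihu⟩
      have := ihg op hop
      simpa [hfind] using this
    · have hop0 : op0 ∈ pvOps := List.mem_of_find?_eq_some hfind
      simp only [hfind, Option.isNone_some]
      set fg' := fg.modify op0 PySem.Dict.empty (fun d => d.insert (PySem.Str.replace kv.1 op0 "") kv.2) with hfg'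
      have hk' : ∀ op ∈ pvOps, fg'.contains op = true := by
        intro op hop
        rw [hfg', PySem.Dict.contains_modify]
        simp [hk op hop]
      obtain ⟨ihk, ihg, ihu⟩ := ih fg' un hk'
      have hkeys' : fg'.keys = fg.keys := by
        rw [hfg', PySem.Dict.keys_modify, PySem.Dict.keys_insert_of_contains _ _ (hk op0 hop0)]
      refine ⟨by rw [ihk, hkeys'], fun op hop => ?_, by simpa using ihu⟩
      rw [ihg op hop]
      by_cases hoe : op = op0
      · subst hoe
        have hbeq : (some op == some op) = true := by simp
        simp only [hfind, hbeq, if_pos]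
        rw [List.foldl_cons]
        congr 1
        rw [hfg', PySem.Dict.getD_modify_self]
      · have hbeq : ((some op0 : Option String) == some op) = false := by
          simp [Ne.symm hoe]
        simp only [hbeq, if_neg, Bool.false_eq_true, not_false_iff, if_false]
        congr 1
        rw [hfg', PySem.Dict.getD_modify]
        simp [hoe]

-- B's group for op equals pvGroup
lemma pvB_group_eq (filters : List (String × String)) (op : String) (hop : op ∈ pvOps) :
    (filters.filter (fun kv => pvOps.find? (fun o => PySem.Str.endswith kv.1 o) == some op)).foldl
      (fun d kv => d.insert (PySem.Str.replace kv.1 op "") kv.2) (PySem.Dict.empty : PySem.Dict String String) =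
    pvGroup filters op := by
  unfold pvGroup pvS
  congr 1
  exact (List.filter_congr (fun kv _ => pv_endswith_iff_find kv.1 op hop)).symm

-- the result of both programs, as a function of pvF
lemma pv_result_form (fg : PySem.Dict String (PySem.Dict String String))
    (F : String → PySem.Dict String String)
    (hkeys : fg.keys = pvOps)
    (hget : ∀ op ∈ pvOps, fg.getD op PySem.Dict.empty = F op) :
    fg.items.map (fun p => (p.1, p.2.items)) = pvOps.map (fun op => (op, (F op).items)) := by
  rw [PySem.Dict.items_eq_map_keys fg (by rw [hkeys]; decide) PySem.Dict.empty, hkeys, List.map_map]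
  exact List.map_congr_left (fun op hop => by simp [hget op hop])

lemma pvA_result (filters : List (String × String)) (hpre : (filters.map Prod.fst).Nodup) :
    group_filters_by_suffix filters = pvOps.map (fun op => (op, (pvF filters op).items)) := by
  unfold group_filters_by_suffix
  rw [pvA_fold filters]
  simp only []
  have hitems := pvA_fg_items filters hpre
  have hkeysA : (pvOps.foldl (fun d k => d.insert k (pvGetSuffix filters PySem.Dict.empty k).1)
      (PySem.Dict.empty : PySem.Dict String (PySem.Dict String String))).keys = pvOps := by
    show ((pvOps.foldl (fun d k => d.insert k (pvGetSuffix filters PySem.Dict.empty k).1)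
      (PySem.Dict.empty : PySem.Dict String (PySem.Dict String String))).items.map Prod.fst) = pvOps
    rw [hitems, List.map_map]
    exact (List.map_congr_left (fun x _ => rfl)).trans (List.map_id _)
  have hgetA : ∀ op ∈ pvOps, (pvOps.foldl (fun d k => d.insert k (pvGetSuffix filters PySem.Dict.empty k).1)
      (PySem.Dict.empty : PySem.Dict String (PySem.Dict String String))).getD op PySem.Dict.empty = pvGroup filters op := by
    intro op hop
    exact PySem.Dict.getD_of_mem_items _ (by rw [hitems]; exact List.mem_map.mpr ⟨op, hop, rfl⟩)
      (by rw [hkeysA]; decide) _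
  have hun := pvA_unmatched filters hpre _ (fun kv hkv => pvA_used_contains filters hpre kv hkv)
  rw [hun]
  have hcont : (pvOps.foldl (fun d k => d.insert k (pvGetSuffix filters PySem.Dict.empty k).1)
      (PySem.Dict.empty : PySem.Dict String (PySem.Dict String String))).contains "__eq" = true := by
    rw [PySem.Dict.contains_eq_decide_mem_keys, hkeysA]; decide
  apply pv_result_form
  · rw [PySem.Dict.keys_modify, PySem.Dict.keys_insert_of_contains _ _ hcont, hkeysA]
  · intro op hop
    rw [PySem.Dict.getD_modify, pvF]
    by_cases hoe : op = "__eq"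
    · simp only [hoe, if_pos]
      rw [hgetA "__eq" (by decide)]
    · simp only [hoe, if_neg, not_false_iff]
      rw [hgetA op hop]

lemma pvB_hkinit : ∀ op ∈ pvOps,
    (pvOps.foldl (fun d op => d.insert op PySem.Dict.empty)
      (PySem.Dict.empty : PySem.Dict String (PySem.Dict String String))).contains op = true := by
  intro op hop; fin_cases hop <;> decide

lemma pvB_result (filters : List (String × String)) :
    group_filters_by_suffix_alt filters = pvOps.map (fun op => (op, (pvF filters op).items)) := by
  unfold group_filters_by_suffix_alt
  simp only [show pvOpsAlt = pvOps from rfl]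
  obtain ⟨hkeys, hget, hun⟩ := pvB_loop filters filters
    (pvOps.foldl (fun d op => d.insert op PySem.Dict.empty) PySem.Dict.empty) PySem.Dict.empty pvB_hkinit
  have hkeysI : (pvOps.foldl (fun d op => d.insert op PySem.Dict.empty)
      (PySem.Dict.empty : PySem.Dict String (PySem.Dict String String))).keys = pvOps := by decide
  have hbase : ∀ op ∈ pvOps, (pvOps.foldl (fun d op => d.insert op PySem.Dict.empty)
      (PySem.Dict.empty : PySem.Dict String (PySem.Dict String String))).getD op PySem.Dict.empty
      = PySem.Dict.empty := by
    intro op hop; fin_cases hop <;> decide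
  apply pv_result_form
  · rw [PySem.Dict.keys_modify,
      PySem.Dict.keys_insert_of_contains _ _
        (by rw [PySem.Dict.contains_eq_decide_mem_keys, hkeys, hkeysI]; decide),
      hkeys, hkeysI]
  · intro op hop
    rw [PySem.Dict.getD_modify, pvF]
    by_cases hoe : op = "__eq"
    · simp only [hoe, if_pos]
      rw [hun, hget "__eq" (by decide), hbase "__eq" (by decide),
        pvB_group_eq filters "__eq" (by decide)]
      rfl
    · simp only [hoe, if_neg, not_false_iff]
      rw [hget op hop, hbase op hop, pvB_group_eq filters op hop]

theorem group_filters_by_suffix_spec : Claim_equal_group_filters_by_suffix := by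
  intro filters _ hpre
  unfold Spec_group_filters_by_suffix
  rw [pvA_result filters hpre, pvB_result filters]
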